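-- pv_equiv track=rewrite | github.com/Eluee/python | solution4.py | solution
-- ===== SOURCE A (Python) =====
-- def solution(arr):
--     max_freq = 0
--     min_freq = arr.count(arr[0])
--     for item in list(set(arr)):
--         freq = arr.count(item)
--         if max_freq < freq:
--             max_freq = freq
--         if min_freq > freq:
--             min_freq = freq
--
--     return int(max_freq / min_freq)
-- ===== SOURCE B (Python) =====
-- def solution(arr):
--     s = sorted(arr)
--     lens = []
--     i = 0
--     n = len(s)
--     while i < n:
--         j = i + 1
--         while j < n and s[j] == s[i]:
--             j += 1
--         lens.append(j - i)
--         i = j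
--     return int(max(lens) / min(lens))
-- ===== Notes on version B (the rewrite author's own statement) =====
-- stated objective: faster
-- what changed: Replaces A's set-plus-repeated-arr.count scans with sort-then-run-scan: sort a copy and walk it once, taking each element's frequency as the length of its maximal run, then max/min over the run lengths.
-- outside the precondition, e.g. on solution([]): A raises IndexError, B raises ValueError
import Mathlib
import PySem

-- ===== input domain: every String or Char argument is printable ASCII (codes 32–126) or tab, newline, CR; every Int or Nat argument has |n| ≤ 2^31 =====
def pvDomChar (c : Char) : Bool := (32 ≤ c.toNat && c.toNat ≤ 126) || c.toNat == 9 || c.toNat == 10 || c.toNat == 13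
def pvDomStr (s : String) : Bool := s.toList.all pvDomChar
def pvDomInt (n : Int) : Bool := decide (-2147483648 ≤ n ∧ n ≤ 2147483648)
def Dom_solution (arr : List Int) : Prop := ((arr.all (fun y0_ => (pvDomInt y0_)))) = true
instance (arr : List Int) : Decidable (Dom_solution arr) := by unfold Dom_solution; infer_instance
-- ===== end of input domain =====

-- B sorts a copy and reads each frequency off as the length of a maximal run of the sorted list (measured faster on large inputs).

-- ===== PORT A =====
-- A iterates over list(set(arr)); the result (max/min of counts) does not depend on that iteration order,
-- so PySem.Set.ofList is an exact port here. int(max_freq/min_freq) is PySem.Int.truncdiv (|values| < 2^53).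
def solution (arr : List Int) : Int :=
  let min_freq0 : Int := (arr.count (arr.headD 0) : Int)   -- arr.count(arr[0]); Pre_ excludes arr = []
  let p := (PySem.Set.ofList arr).foldl (fun (p : Int × Int) item =>
      let freq : Int := (arr.count item : Int)
      (if p.1 < freq then freq else p.1, if p.2 > freq then freq else p.2))
    ((0 : Int), min_freq0)
  PySem.Int.truncdiv p.1 p.2

-- ===== PORT B =====
-- Source B's index loop 'while i < n: j = i+1; while j < n and s[j]==s[i]: j += 1; lens.append(j-i); i = j'
-- transcribed structurally: the inner while measures the run (j - i = 1 + takeWhile length), 'i = j' is the drop.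
def runLengths : List Int → List Int
  | [] => []
  | x :: xs =>
    let k := (xs.takeWhile (fun y => y == x)).length
    ((1 + k : Nat) : Int) :: runLengths (xs.drop k)
termination_by l => l.length
decreasing_by
  simp only [List.length_drop, List.length_cons]
  omega

def solution_alt (arr : List Int) : Int :=
  let s := PySem.List.sorted arr (fun x => x) false
  let lens := runLengths s
  match PySem.List.max? lens (fun v => v), PySem.List.min? lens (fun v => v) with
  | some mx, some mn => PySem.Int.truncdiv mx mn
  | _, _ => 0   -- unreachable under Pre_ (max/min of an empty sequence raises in Python)

-- ===== PRECONDITION & SPEC =====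
-- Pre_ excludes only the empty list, on which A raises IndexError (arr[0]) and B raises ValueError (max([])).
def Pre_solution (arr : List Int) : Prop := arr ≠ []
instance (arr : List Int) : Decidable (Pre_solution arr) := by unfold Pre_solution; infer_instance
def pvWitness_solution : List Int := [1, 2, 2]
def Spec_solution (arr : List Int) (out : Int) : Prop := out = solution_alt arr
instance (arr : List Int) (out : Int) : Decidable (Spec_solution arr out) := by unfold Spec_solution; infer_instance

-- ===== CLAIM (what is proved, stated in full; the proofs are below) =====
def Claim_equal_solution : Prop := ∀ (arr : List Int), Dom_solution arr → Pre_solution arr → Spec_solution arr (solution arr)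

-- ===== LEMMAS AND PROOFS =====

-- A's max/min pair loop splits into a max fold and a min fold over the mapped counts
theorem pv_fold_pair (c : Int → Int) (l : List Int) : ∀ (m n : Int),
    l.foldl (fun (p : Int × Int) item =>
        (if p.1 < c item then c item else p.1, if p.2 > c item then c item else p.2)) (m, n)
      = ((l.map c).foldl max m, (l.map c).foldl min n) := by
  induction l with
  | nil => intro m n; rfl
  | cons x xs ih =>
    intro m n
    simp only [List.foldl_cons, List.map_cons]
    have h1 : (if m < c x then c x else m) = max m (c x) := by rw [max_def]; split_ifs <;> omega
    have h2 : (if n > c x then c x else n) = min n (c x) := by rw [min_def]; split_ifs <;> omega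
    rw [h1, h2, ih]

theorem pv_drop_len_takeWhile (xs : List Int) (p : Int → Bool) :
    xs.drop (xs.takeWhile p).length = xs.dropWhile p := by
  have h := List.takeWhile_append_dropWhile (p := p) (l := xs)
  calc xs.drop (xs.takeWhile p).length
      = (xs.takeWhile p ++ xs.dropWhile p).drop (xs.takeWhile p).length := by rw [h]
    _ = xs.dropWhile p := List.drop_left

-- in a sorted context (x below everything), dropping the leading run of x removes every x
theorem pv_not_mem_dropWhile_sorted (x : Int) (xs : List Int)
    (hpw : xs.Pairwise (· ≤ ·)) (hxle : ∀ z ∈ xs, x ≤ z) :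
    x ∉ xs.dropWhile (fun y => y == x) := by
  intro hx
  cases hr : xs.dropWhile (fun y => y == x) with
  | nil => rw [hr] at hx; exact absurd hx (List.not_mem_nil)
  | cons y ys =>
    have hy : ¬ (y == x) = true := by
      have := List.head?_dropWhile_not (p := fun y => y == x) (l := xs)
      rw [hr] at this; simpa using this
    have hyne : y ≠ x := by simpa using hy
    have hsub : (y :: ys).Sublist xs := hr ▸ List.dropWhile_sublist _
    have hpw2 : (y :: ys).Pairwise (· ≤ ·) := hpw.sublist hsub
    have hxy : x ≤ y := hxle y (hsub.mem (List.mem_cons_self))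
    rw [hr] at hx
    rcases List.mem_cons.mp hx with h | h
    · exact hyne h.symm
    · have : y ≤ x := (List.pairwise_cons.mp hpw2).1 x h
      exact hyne (le_antisymm this hxy)

-- on a sorted list the run lengths are exactly the counts of its elements
theorem pv_runLengths_mem (s : List Int) : s.Pairwise (· ≤ ·) → ∀ v : Int,
    (v ∈ runLengths s ↔ ∃ k, k ∈ s ∧ (s.count k : Int) = v) := by
  induction s using runLengths.induct with
  | case1 => simp [runLengths]
  | case2 x xs k ih =>
    intro hs v
    obtain ⟨hxle, hpxs⟩ := List.pairwise_cons.mp hs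
    have hdrop : xs.drop k = xs.dropWhile (fun y => y == x) := pv_drop_len_takeWhile xs _
    have htw : ∀ y ∈ xs.takeWhile (fun y => y == x), y = x := by
      intro y hy
      have := List.mem_takeWhile_imp hy
      simpa using this
    have hxr : x ∉ xs.drop k := by
      rw [hdrop]; exact pv_not_mem_dropWhile_sorted x xs hpxs hxle
    have hsplit : xs.takeWhile (fun y => y == x) ++ xs.drop k = xs := by
      rw [hdrop]; exact List.takeWhile_append_dropWhile
    have hcx : (x :: xs).count x = 1 + k := by
      have h1 : (xs.takeWhile (fun y => y == x)).count x = k := by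
        apply List.count_eq_length.mpr
        intro b hb; exact (htw b hb).symm
      have h2 : (xs.drop k).count x = 0 := List.count_eq_zero.mpr hxr
      have h3 : xs.count x = k := by
        conv_lhs => rw [← hsplit]
        rw [List.count_append, h1, h2, Nat.add_zero]
      simp [h3]; omega
    have hcr : ∀ z ∈ xs.drop k, (x :: xs).count z = (xs.drop k).count z := by
      intro z hz
      have hzx : z ≠ x := fun h => hxr (h ▸ hz)
      have h1 : (xs.takeWhile (fun y => y == x)).count z = 0 := by
        apply List.count_eq_zero.mpr
        intro hmem; exact hzx (htw z hmem)
      have h2 : xs.count z = (xs.drop k).count z := by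
        conv_lhs => rw [← hsplit]
        rw [List.count_append, h1, Nat.zero_add]
      rw [List.count_cons, h2]
      simp [Ne.symm hzx]
    have hrest := ih (hpxs.sublist (hdrop ▸ List.dropWhile_sublist _)) v
    constructor
    · intro hv
      rcases List.mem_cons.mp (by simpa [runLengths] using hv) with h | h
      · exact ⟨x, List.mem_cons_self, by rw [hcx]; push_cast; omega⟩
      · obtain ⟨z, hz, hcount⟩ := hrest.mp h
        exact ⟨z, List.mem_cons_of_mem _ ((hdrop ▸ List.dropWhile_sublist _).mem hz),
          by rw [hcr z hz]; exact hcount⟩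
    · rintro ⟨z, hz, hcount⟩
      simp only [runLengths]
      rw [List.mem_cons]
      rcases List.mem_cons.mp hz with h | h
      · left; rw [h, hcx] at hcount; push_cast at hcount ⊢; omega
      · rcases (List.mem_append.mp (hsplit ▸ h)) with h2 | h2
        · have : z = x := htw z h2
          left; rw [this, hcx] at hcount; push_cast at hcount ⊢; omega
        · right; exact hrest.mpr ⟨z, h2, by rw [← hcr z h2]; exact hcount⟩

-- ===== VERDICT (by name: the statement is the Claim_ definition above) =====
theorem solution_spec : Claim_equal_solution := by
  intro arr _hdom hpre
  unfold Spec_solution solution solution_alt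
  obtain ⟨a, t, rfl⟩ : ∃ a t, arr = a :: t := by
    cases arr with
    | nil => exact absurd rfl hpre
    | cons a t => exact ⟨a, t, rfl⟩
  dsimp only []
  rw [pv_fold_pair]
  set c : Int → Int := fun i => ((a :: t).count i : Int) with hc
  set S : List Int := PySem.Set.ofList (a :: t) with hS
  set s : List Int := PySem.List.sorted (a :: t) (fun x => x) false with hsdef
  -- B's run-length list is nonempty
  obtain ⟨b, u, hsu⟩ : ∃ b u, s = b :: u := by
    cases hcase : s with
    | nil =>
      rw [hsdef] at hcase
      exact absurd ((PySem.List.sorted_eq_nil_iff (a :: t) (fun x => x) false).mp hcase)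
        (List.cons_ne_nil a t)
    | cons b u => exact ⟨b, u, rfl⟩
  have hL : runLengths s = ((1 + (u.takeWhile (fun y => y == b)).length : Nat) : Int)
      :: runLengths (u.drop (u.takeWhile (fun y => y == b)).length) := by
    rw [hsu]; simp only [runLengths]
  set h : Int := ((1 + (u.takeWhile (fun y => y == b)).length : Nat) : Int) with hh
  set tL : List Int := runLengths (u.drop (u.takeWhile (fun y => y == b)).length) with htL
  rw [hL, PySem.List.max?_id_cons, PySem.List.min?_id_cons]
  -- membership transfer: values of B's run-length list = values of A's count list
  have hmem : ∀ v : Int, v ∈ h :: tL ↔ v ∈ S.map c := by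
    intro v
    rw [← hL, pv_runLengths_mem s (by
        rw [hsdef]; exact PySem.List.sorted_pairwise (a :: t) (fun x => x)) v]
    constructor
    · rintro ⟨z, hz, hv⟩
      refine List.mem_map.mpr ⟨z, (PySem.Set.mem_ofList (a :: t) z).mpr ?_, ?_⟩
      · exact (PySem.List.mem_sorted (a :: t) (fun x => x) false z).mp (hsdef ▸ hz)
      · rw [hc]
        show (((a :: t).count z : Nat) : Int) = v
        rw [← (PySem.List.sorted_perm (a :: t) (fun x => x) false).count_eq]
        exact hsdef ▸ hv
    · intro hv
      obtain ⟨z, hz, hv⟩ := List.mem_map.mp hv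
      refine ⟨z, ?_, ?_⟩
      · rw [hsdef, PySem.List.mem_sorted]
        exact (PySem.Set.mem_ofList (a :: t) z).mp (hS ▸ hz)
      · rw [hsdef]
        show ((((PySem.List.sorted (a :: t) (fun x => x) false).count z : Nat)) : Int) = v
        rw [(PySem.List.sorted_perm (a :: t) (fun x => x) false).count_eq]
        exact hv
  have hca_mem : c a ∈ S.map c :=
    List.mem_map.mpr ⟨a, (PySem.Set.mem_ofList (a :: t) a).mpr List.mem_cons_self, rfl⟩
  have hca_pos : 1 ≤ c a := by
    have h1 : 1 ≤ (a :: t).count a := List.one_le_count_iff.mpr List.mem_cons_self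
    rw [hc]
    change (1 : Int) ≤ (((a :: t).count a : Nat) : Int)
    exact_mod_cast h1
  -- max sides agree
  have hmax : (S.map c).foldl max 0 = tL.foldl max h := by
    have bA := PySem.List.le_foldl_max (S.map c) 0
    have mA := PySem.List.foldl_max_mem (S.map c) 0
    have bB := PySem.List.le_foldl_max tL h
    have mB := PySem.List.foldl_max_mem tL h
    have hMA_mem : (S.map c).foldl max 0 ∈ S.map c := by
      rcases mA with h0 | h0
      · exfalso; have := bA.2 (c a) hca_mem; omega
      · exact h0
    have hMA_in : (S.map c).foldl max 0 ∈ h :: tL := (hmem _).mpr hMA_mem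
    have hle1 : (S.map c).foldl max 0 ≤ tL.foldl max h := by
      rcases List.mem_cons.mp hMA_in with h0 | h0
      · rw [h0]; exact bB.1
      · exact bB.2 _ h0
    have hMB_in : tL.foldl max h ∈ h :: tL := by
      rcases mB with h0 | h0
      · rw [h0]; exact List.mem_cons_self
      · exact List.mem_cons_of_mem _ h0
    have hle2 : tL.foldl max h ≤ (S.map c).foldl max 0 := bA.2 _ ((hmem _).mp hMB_in)
    omega
  -- min sides agree
  have hmin : (S.map c).foldl min (c a) = tL.foldl min h := by
    have bA := PySem.List.foldl_min_le (S.map c) (c a)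
    have mA := PySem.List.foldl_min_mem (S.map c) (c a)
    have bB := PySem.List.foldl_min_le tL h
    have mB := PySem.List.foldl_min_mem tL h
    have hmA_mem : (S.map c).foldl min (c a) ∈ S.map c := by
      rcases mA with h0 | h0
      · rw [h0]; exact hca_mem
      · exact h0
    have hmA_in : (S.map c).foldl min (c a) ∈ h :: tL := (hmem _).mpr hmA_mem
    have hle1 : tL.foldl min h ≤ (S.map c).foldl min (c a) := by
      rcases List.mem_cons.mp hmA_in with h0 | h0
      · rw [h0]; exact bB.1
      · exact bB.2 _ h0
    have hmB_in : tL.foldl min h ∈ h :: tL := by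
      rcases mB with h0 | h0
      · rw [h0]; exact List.mem_cons_self
      · exact List.mem_cons_of_mem _ h0
    have hle2 : (S.map c).foldl min (c a) ≤ tL.foldl min h := bA.2 _ ((hmem _).mp hmB_in)
    omega
  simp only [List.headD_cons]
  rw [hmax, hmin]
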